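-- pv_equiv track=rewrite | github.com/tltv-org/cathode | app/protocol/uri.py | _parse_query_first_occurrence
-- ===== SOURCE A (Python) =====
-- def _parse_query_first_occurrence(query_string: str) -> dict[str, str]:
--     """Parse query string, using first occurrence for duplicate params.
--
--     Section 3.1: duplicate query parameters use first occurrence only.
--     """
--     params: dict[str, str] = {}
--     if not query_string:
--         return params
--     for part in query_string.split("&"):
--         if "=" not in part:
--             continue
--         key, _, value = part.partition("=")
--         if key not in params:
--             params[key] = value
--     return params
-- ===== SOURCE B (Python) =====
-- def _parse_query_first_occurrence(query_string: str) -> dict[str, str]: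
--     """Parse query string, using first occurrence for duplicate params.
--
--     Two passes: a reverse sweep where plain assignment makes the earliest
--     value win, then a forward comprehension emitting keys in first-seen order.
--     """
--     pairs = [part.partition("=") for part in query_string.split("&")]
--     first: dict[str, str] = {}
--     for key, sep, value in reversed(pairs):
--         if sep:
--             first[key] = value
--     return {key: first[key] for key, sep, _ in pairs if sep}
-- ===== Notes on version B (the rewrite author's own statement) =====
-- stated objective: alternative
-- what changed: B replaces A's single forward loop with a membership test by two passes: a reverse sweep where unconditional assignment lets the earliest value win, then a forward comprehension that emits keys in first-seen order.
import Mathlib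
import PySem

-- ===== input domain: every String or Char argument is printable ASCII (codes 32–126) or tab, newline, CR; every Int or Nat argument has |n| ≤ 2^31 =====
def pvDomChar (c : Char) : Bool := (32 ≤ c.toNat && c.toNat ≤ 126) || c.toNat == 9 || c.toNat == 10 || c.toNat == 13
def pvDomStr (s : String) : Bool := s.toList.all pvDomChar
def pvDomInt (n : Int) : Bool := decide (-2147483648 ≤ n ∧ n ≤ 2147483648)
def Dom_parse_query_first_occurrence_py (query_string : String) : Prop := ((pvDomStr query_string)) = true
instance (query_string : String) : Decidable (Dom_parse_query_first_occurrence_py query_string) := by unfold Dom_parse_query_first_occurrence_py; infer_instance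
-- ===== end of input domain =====

-- B parses in two passes (reverse sweep with overwrite, then emission in first-seen order)
-- instead of A's forward loop with a membership test (objective: alternative).

-- shared helper: part.partition("=") — hand port (PySem has no partition), exact:
-- scans for the FIRST '=', returns (before, "=", after), or (s, "", "") if absent.
def pvPartChars : List Char → Option (List Char × List Char)
  | [] => none
  | c :: cs =>
    if c = '=' then some ([], cs)
    else (pvPartChars cs).map (fun p => (c :: p.1, p.2))

def pvPartitionEq (s : String) : String × String × String :=
  match pvPartChars s.toList with
  | some p => (String.ofList p.1, "=", String.ofList p.2)
  | none => (s, "", "")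

-- query_string.split("&"): split? is `some` since the separator "&" is non-empty
def pvSplitAmp (qs : String) : List String := (PySem.Str.split? qs "&").getD []

-- ===== PORT A =====
def parse_query_first_occurrence_py (query_string : String) : List (String × String) :=
  let params : PySem.Dict String String := PySem.Dict.empty
  if query_string = "" then params.items
  else
    ((pvSplitAmp query_string).foldl
      (fun params part =>
        if PySem.Str.isIn "=" part = false then params
        else
          let t := pvPartitionEq part
          if params.contains t.1 then params
          else params.insert t.1 t.2.2)
      params).items

-- ===== PORT B =====
-- pairs = [part.partition("=") for part in query_string.split("&")]
def pvPairsB (query_string : String) : List (String × String × String) :=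
  (pvSplitAmp query_string).map pvPartitionEq

-- the reverse sweep building `first`
def pvFirstB (pairs : List (String × String × String)) : PySem.Dict String String :=
  pairs.reverse.foldl
    (fun first t => if t.2.1 = "" then first else first.insert t.1 t.2.2)
    PySem.Dict.empty

-- final comprehension; first[key] cannot raise (every emitted key was assigned in the
-- sweep), so the lookup is ported as getD with an irrelevant default
def parse_query_first_occurrence_py_alt (query_string : String) : List (String × String) :=
  let pairs := pvPairsB query_string
  let first := pvFirstB pairs
  (pairs.foldl
    (fun d t => if t.2.1 = "" then d else d.insert t.1 (first.getD t.1 ""))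
    (PySem.Dict.empty : PySem.Dict String String)).items

-- ===== PRECONDITION & SPEC =====
def Spec_parse_query_first_occurrence_py (query_string : String) (out : List (String × String)) : Prop := out = parse_query_first_occurrence_py_alt query_string
instance (query_string : String) (out : List (String × String)) : Decidable (Spec_parse_query_first_occurrence_py query_string out) := by unfold Spec_parse_query_first_occurrence_py; infer_instance

-- ===== CLAIM (what is proved, stated in full; the proofs are below) =====
def Claim_equal_parse_query_first_occurrence_py : Prop := ∀ (query_string : String), Dom_parse_query_first_occurrence_py query_string → Spec_parse_query_first_occurrence_py query_string (parse_query_first_occurrence_py query_string)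

-- ===== LEMMAS AND PROOFS =====

-- predicate "this pair has key k and a real separator"
def pvHit (k : String) (t : String × String × String) : Bool :=
  decide (t.2.1 ≠ "") && (t.1 == k)

theorem pvPartChars_eq_none_iff (l : List Char) : pvPartChars l = none ↔ '=' ∉ l := by
  induction l with
  | nil => simp [pvPartChars]
  | cons c cs ih =>
    by_cases hc : c = '='
    · simp [pvPartChars, hc]
    · simp [pvPartChars, hc, Option.map_eq_none_iff, ih, Ne.symm hc]

theorem pvIsIn_eq_false_iff (p : String) :
    PySem.Str.isIn "=" p = false ↔ pvPartChars p.toList = none := by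
  rw [pvPartChars_eq_none_iff, ← Bool.not_eq_true, PySem.Str.isIn_iff_infix]
  have : ("=" : String).toList = ['='] := rfl
  rw [this, List.singleton_infix_iff]

theorem pvSep_empty_iff (p : String) :
    (pvPartitionEq p).2.1 = "" ↔ PySem.Str.isIn "=" p = false := by
  rw [pvIsIn_eq_false_iff]
  cases h : pvPartChars p.toList <;> simp [pvPartitionEq, h]

-- getD of the reverse sweep = value of the FIRST hit in the forward list
theorem pvFirst_getD (l : List (String × String × String))
    (d : PySem.Dict String String) (k : String) :
    (l.foldl (fun d t => if t.2.1 = "" then d else d.insert t.1 t.2.2) d).getD k ""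
      = match l.reverse.find? (pvHit k) with
        | some t => t.2.2
        | none => d.getD k "" := by
  induction l generalizing d with
  | nil => simp
  | cons t rest ih =>
    simp only [List.foldl_cons, List.reverse_cons, List.find?_append, ih]
    cases hf : rest.reverse.find? (pvHit k) with
    | some s => simp
    | none =>
      simp only [Option.none_or]
      by_cases hs : t.2.1 = ""
      · rw [List.find?_cons_of_neg (by simp [pvHit, hs]), List.find?_nil, if_pos hs]
      · rw [if_neg hs]
        by_cases hk : t.1 = k
        · subst hk
          rw [List.find?_cons_of_pos (by simp [pvHit, hs])]
          simp [PySem.Dict.getD_insert_self]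
        · rw [List.find?_cons_of_neg (by simp [pvHit, hk]), List.find?_nil,
            PySem.Dict.getD_insert_of_ne _ _ _ (Ne.symm hk)]

-- overwriting a key with its current value leaves the dict unchanged
theorem pv_insert_same {d : PySem.Dict String String} {k v : String}
    (hnd : d.keys.Nodup) (h : d.get? k = some v) : d.insert k v = d := by
  apply PySem.Dict.ext
  rw [PySem.Dict.items_insert_of_contains _ _ (by rw [PySem.Dict.contains_eq_isSome_get?, h]; rfl)]
  conv_rhs => rw [← List.map_id d.items]
  refine List.map_congr_left ?_
  rintro ⟨pk, pv⟩ hp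
  by_cases hk : pk = k
  · subst hk
    have h2 := PySem.Dict.get?_of_mem_items d hp hnd
    rw [h2] at h
    have hv : pv = v := by injection h
    simp [hv]
  · simp [hk]

-- main invariant: starting from a dict whose entries already carry the global
-- first-occurrence values (g), A's guarded fold and B's overwrite fold agree,
-- provided every key the dict misses gets g of its first hit in the rest
theorem pv_main (g : String → String) :
    ∀ (l : List (String × String × String)) (d : PySem.Dict String String),
    d.keys.Nodup →
    (∀ k, d.contains k = true → d.get? k = some (g k)) →
    (∀ k t, d.contains k = false → l.find? (pvHit k) = some t → t.2.2 = g k) →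
    l.foldl (fun d t => if t.2.1 = "" then d else if d.contains t.1 then d
              else d.insert t.1 t.2.2) d
      = l.foldl (fun d t => if t.2.1 = "" then d else d.insert t.1 (g t.1)) d := by
  intro l
  induction l with
  | nil => intro d _ _ _; rfl
  | cons t rest ih =>
    intro d hnd hv hf
    simp only [List.foldl_cons]
    by_cases hs : t.2.1 = ""
    · rw [if_pos hs, if_pos hs]
      exact ih d hnd hv (fun k s hk hfind => hf k s hk
        (by rw [List.find?_cons_of_neg (by simp [pvHit, hs])]; exact hfind))
    · rw [if_neg hs, if_neg hs]
      by_cases hc : d.contains t.1 = true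
      · rw [if_pos hc, pv_insert_same hnd (hv t.1 hc)]
        refine ih d hnd hv (fun k s hk hfind => hf k s hk ?_)
        have hne : t.1 ≠ k := fun h => by rw [h] at hc; rw [hc] at hk; cases hk
        rw [List.find?_cons_of_neg (by simp [pvHit, hne])]
        exact hfind
      · rw [if_neg hc]
        have hc' : d.contains t.1 = false := by simpa using hc
        have hgt : t.2.2 = g t.1 := hf t.1 t hc'
          (by rw [List.find?_cons_of_pos (by simp [pvHit, hs])])
        rw [hgt]
        refine ih (d.insert t.1 (g t.1)) (PySem.Dict.nodup_keys_insert _ _ _ hnd)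
          (fun k hk => ?_) (fun k s hk hfind => ?_)
        · by_cases hkk : k = t.1
          · subst hkk; rw [PySem.Dict.get?_insert_self]
          · rw [PySem.Dict.get?_insert_of_ne _ _ hkk]
            rw [PySem.Dict.contains_insert] at hk
            exact hv k (by simpa [hkk] using hk)
        · rw [PySem.Dict.contains_insert] at hk
          have hkk : k ≠ t.1 ∧ d.contains k = false := by
            constructor
            · intro h; rw [h] at hk; simp at hk
            · cases h : d.contains k
              · rfl
              · rw [h] at hk; simp at hk
          refine hf k s hkk.2 ?_
          rw [List.find?_cons_of_neg (by simp [pvHit, Ne.symm hkk.1])]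
          exact hfind

-- ===== VERDICT (by name: the statement is the Claim_ definition above) =====
theorem parse_query_first_occurrence_py_spec : Claim_equal_parse_query_first_occurrence_py := by
  intro qs _
  unfold Spec_parse_query_first_occurrence_py parse_query_first_occurrence_py
    parse_query_first_occurrence_py_alt
  by_cases h : qs = ""
  · subst h; decide
  · rw [if_neg h]
    congr 1
    -- rewrite A's fold over parts as a fold over pairs
    have hA : (pvSplitAmp qs).foldl
        (fun params part =>
          if PySem.Str.isIn "=" part = false then params
          else
            let t := pvPartitionEq part
            if params.contains t.1 then params else params.insert t.1 t.2.2)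
        PySem.Dict.empty
        = (pvPairsB qs).foldl
          (fun d t => if t.2.1 = "" then d else if d.contains t.1 then d
            else d.insert t.1 t.2.2) PySem.Dict.empty := by
      rw [pvPairsB, List.foldl_map]
      refine List.foldl_ext _ _ _ (fun d p _ => ?_)
      by_cases hin : PySem.Str.isIn "=" p = false
      · rw [if_pos hin, if_pos ((pvSep_empty_iff p).mpr hin)]
      · rw [if_neg hin, if_neg (fun hc => hin ((pvSep_empty_iff p).mp hc))]
    rw [hA]
    exact pv_main (fun k => (pvFirstB (pvPairsB qs)).getD k "") (pvPairsB qs)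
      PySem.Dict.empty PySem.Dict.nodup_keys_empty
      (fun k hk => by simp [PySem.Dict.contains_empty] at hk)
      (fun k t _ hfind => by
        show t.2.2 = (pvFirstB (pvPairsB qs)).getD k ""
        rw [pvFirstB, pvFirst_getD, List.reverse_reverse, hfind])
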